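-- pv_equiv track=rewrite | github.com/dmitry487/python-Ege2024 | ege/ege3/9/52180/52180.py | check
-- ===== SOURCE A (Python) =====
-- def check(row):
--     chet = []
--     nechet = []
--     for num in row:
--         if num%2 == 0:
--             chet.append(num)
--         else:
--             nechet.append(num)
--     if (
--         (
--             (len(set(row))) == len(row)
--         )and
--         (
--             (len(chet)) > (len(nechet))
--         )and
--         (
--             (sum(chet)) < (sum(nechet))
--         )
--     ):return True
--     return False
-- ===== SOURCE B (Python) =====
-- def check(row):
--     s = sorted(row)
--     if any(a == b for a, b in zip(s, s[1:])):
--         return False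
--     odd = sum(n % 2 for n in row)
--     if len(row) - odd <= odd:
--         return False
--     return 2 * sum(n for n in row if n % 2) > sum(row)
-- ===== Notes on version B (the rewrite author's own statement) =====
-- stated objective: alternative
-- what changed: Replaces A's parity-partition into two lists plus len(set(row)) by a sort-then-adjacent-scan distinctness test with early returns, an arithmetic odd count via sum(n % 2), and the sum comparison rewritten as 2*odd_sum > total.
import Mathlib
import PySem

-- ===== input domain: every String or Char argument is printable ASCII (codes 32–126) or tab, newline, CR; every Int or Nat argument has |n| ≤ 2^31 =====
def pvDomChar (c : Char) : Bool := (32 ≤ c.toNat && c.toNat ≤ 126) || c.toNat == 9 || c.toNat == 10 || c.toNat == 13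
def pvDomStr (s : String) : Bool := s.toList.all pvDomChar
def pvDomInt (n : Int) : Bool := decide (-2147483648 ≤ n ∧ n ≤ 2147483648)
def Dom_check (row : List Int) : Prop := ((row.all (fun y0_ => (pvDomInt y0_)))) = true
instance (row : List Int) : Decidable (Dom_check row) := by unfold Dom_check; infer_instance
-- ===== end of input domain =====

-- B tests distinctness by sorting and scanning adjacent pairs, counts odds arithmetically via sum(n % 2),
-- and compares 2*odd_sum with the total, with early returns: a different algorithm of similar cost.

-- ===== PORT A =====
def check (row : List Int) : Bool :=
  let st := row.foldl
    (fun (p : List Int × List Int) num =>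
      if PySem.Int.mod num 2 == 0 then (p.1 ++ [num], p.2) else (p.1, p.2 ++ [num]))
    ([], [])
  if ((PySem.Set.ofList row).length == row.length)
      && decide (st.1.length > st.2.length)
      && decide (st.1.sum < st.2.sum) then
    true
  else
    false

-- ===== PORT B =====
def check_alt (row : List Int) : Bool :=
  let s := PySem.List.sorted row (fun x => x) false
  if (s.zip (PySem.List.slice s (some 1) none)).any (fun p => p.1 == p.2) then
    false
  else if decide ((row.length : Int) - (row.map (fun n => PySem.Int.mod n 2)).sum
                    ≤ (row.map (fun n => PySem.Int.mod n 2)).sum) then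
    false
  else
    decide (2 * (row.filter (fun n => PySem.Int.mod n 2 != 0)).sum > row.sum)

-- ===== PRECONDITION & SPEC =====
def Spec_check (row : List Int) (out : Bool) : Prop := out = check_alt row
instance (row : List Int) (out : Bool) : Decidable (Spec_check row out) := by unfold Spec_check; infer_instance

-- ===== CLAIM (what is proved, stated in full; the proofs are below) =====
def Claim_equal_check : Prop := ∀ (row : List Int), Dom_check row → Spec_check row (check row)

-- ===== LEMMAS AND PROOFS =====

-- A's loop in closed form.
theorem foldA_eq (p : Int → Bool) (row : List Int) (c n : List Int) :
    row.foldl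
      (fun (q : List Int × List Int) num =>
        if p num then (q.1 ++ [num], q.2) else (q.1, q.2 ++ [num]))
      (c, n)
    = (c ++ row.filter p, n ++ row.filter (fun x => !p x)) := by
  induction row generalizing c n with
  | nil => simp
  | cons h t ih =>
    simp only [List.foldl]
    cases hp : p h <;> simp [hp, ih]

-- len(set(row)) == len(row) is exactly Nodup.
theorem ofList_length_lt_of_not_nodup (row : List Int) (hnd : ¬ row.Nodup) :
    (PySem.Set.ofList row).length < row.length := by
  induction row with
  | nil => simp at hnd
  | cons x xs ih =>
    rw [PySem.Set.ofList_cons]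
    by_cases hx : x ∈ xs
    · have hmem : x ∈ PySem.Set.ofList xs := (PySem.Set.mem_ofList _ _).2 hx
      have hlt : (PySem.Set.discard (PySem.Set.ofList xs) x).length
          < (PySem.Set.ofList xs).length := by
        unfold PySem.Set.discard
        exact List.length_filter_lt_length_iff_exists.2 ⟨x, hmem, by simp⟩
      have hle := PySem.Set.length_ofList_le xs
      simp only [List.length_cons]
      omega
    · have hnd' : ¬ xs.Nodup := fun h' => hnd (List.nodup_cons.2 ⟨hx, h'⟩)
      have hdc : PySem.Set.discard (PySem.Set.ofList xs) x = PySem.Set.ofList xs := by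
        unfold PySem.Set.discard
        apply List.filter_eq_self.2
        intro a ha
        have hne : a ≠ x := fun hax => hx ((PySem.Set.mem_ofList _ _).1 (hax ▸ ha))
        simp [hne]
      have := ih hnd'
      simp only [hdc, List.length_cons]
      omega

theorem ofList_length_iff_nodup (row : List Int) :
    (PySem.Set.ofList row).length = row.length ↔ row.Nodup := by
  constructor
  · intro h
    by_contra hnd
    have := ofList_length_lt_of_not_nodup row hnd
    omega
  · intro h
    rw [PySem.Set.ofList_eq_self_of_nodup row h]

-- for a ≤-sorted list, the adjacent-pair scan detects exactly the duplicates
theorem sorted_adj_any_eq_false_iff_nodup (s : List Int)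
    (hpw : s.Pairwise (fun a b => a ≤ b)) :
    ((s.zip s.tail).any (fun p => p.1 == p.2) = false) ↔ s.Nodup := by
  induction s with
  | nil => simp
  | cons a t ih =>
    cases t with
    | nil => simp
    | cons b u =>
      rcases List.pairwise_cons.1 hpw with ⟨hall, hpw'⟩
      rcases List.pairwise_cons.1 hpw' with ⟨hallb, _⟩
      simp only [List.tail_cons, List.zip_cons_cons, List.any_cons, Bool.or_eq_false_iff,
        beq_eq_false_iff_ne, ne_eq]
      constructor
      · rintro ⟨hab, hrest⟩
        have hnd' : (b :: u).Nodup := (ih hpw').1 (by simpa using hrest)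
        refine List.nodup_cons.2 ⟨?_, hnd'⟩
        intro hmem
        rcases List.mem_cons.1 hmem with h | h
        · exact hab h
        · have h1 : a ≤ b := hall b (List.mem_cons_self ..)
          have h2 : b ≤ a := hallb a h
          exact hab (le_antisymm h1 h2)
      · intro hnd
        rcases List.nodup_cons.1 hnd with ⟨hna, hnd'⟩
        refine ⟨fun h => hna (h ▸ List.mem_cons_self ..), ?_⟩
        simpa using (ih hpw').2 hnd'

theorem adj_any_eq_false_iff_nodup (row : List Int) :
    (((PySem.List.sorted row (fun x => x) false).zip
        (PySem.List.sorted row (fun x => x) false).tail).any (fun p => p.1 == p.2) = false)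
      ↔ row.Nodup := by
  have hperm : (PySem.List.sorted row (fun x => x) false).Perm row :=
    PySem.List.sorted_perm row (fun x => x) false
  have hpw : (PySem.List.sorted row (fun x => x) false).Pairwise (fun a b => a ≤ b) := by
    simpa using PySem.List.sorted_pairwise row (fun x => x)
  rw [sorted_adj_any_eq_false_iff_nodup _ hpw]
  exact hperm.nodup_iff

-- sum(n % 2) counts the odd elements
theorem sum_mod_two_eq_count (row : List Int) :
    (row.map (fun n => PySem.Int.mod n 2)).sum
      = ((row.filter (fun n => !(PySem.Int.mod n 2 == 0))).length : Int) := by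
  induction row with
  | nil => simp
  | cons a t ih =>
    have h2 : PySem.Int.mod a 2 = 0 ∨ PySem.Int.mod a 2 = 1 := by
      have h0 := PySem.Int.mod_nonneg a (b := 2) (by norm_num)
      have h1 := PySem.Int.mod_lt a (b := 2) (by norm_num)
      omega
    rw [List.map_cons, List.sum_cons, List.filter_cons]
    rcases h2 with h | h
    · have hb : (!(PySem.Int.mod a 2 == 0)) = false := by rw [h]; rfl
      rw [hb, if_neg (by simp), ih, h]
      ring
    · have hb : (!(PySem.Int.mod a 2 == 0)) = true := by rw [h]; rfl
      rw [hb, if_pos rfl, ih, h, List.length_cons]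
      push_cast
      ring

theorem length_filter_partition (p : Int → Bool) (row : List Int) :
    (row.filter p).length + (row.filter (fun x => !p x)).length = row.length := by
  induction row with
  | nil => rfl
  | cons a t ih => cases hp : p a <;> simp [hp] <;> omega

theorem sum_filter_partition (p : Int → Bool) (row : List Int) :
    (row.filter p).sum + (row.filter (fun x => !p x)).sum = row.sum := by
  induction row with
  | nil => rfl
  | cons a t ih => cases hp : p a <;> simp [hp] <;> linarith [ih]

theorem pvIfBool (b : Bool) : (if b = true then true else false) = b := by cases b <;> rfl

-- ===== VERDICT (by name: the statement is the Claim_ definition above) =====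
theorem check_spec : Claim_equal_check := by
  intro row _
  unfold Spec_check check check_alt
  rw [foldA_eq (fun num => PySem.Int.mod num 2 == 0)]
  simp only [PySem.List.slice_from_one, List.nil_append]
  have hfeq : row.filter (fun n => PySem.Int.mod n 2 != 0)
      = row.filter (fun x => !(PySem.Int.mod x 2 == 0)) := rfl
  have hcnt := length_filter_partition (fun n => PySem.Int.mod n 2 == 0) row
  have hsum := sum_filter_partition (fun n => PySem.Int.mod n 2 == 0) row
  have hmod := sum_mod_two_eq_count row
  by_cases hnd : row.Nodup
  · have hadj := (adj_any_eq_false_iff_nodup row).2 hnd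
    have hlen : ((PySem.Set.ofList row).length == row.length) = true := by
      simp [ofList_length_iff_nodup row, hnd]
    simp only [hadj, hlen, Bool.true_and, hfeq, hmod, Bool.false_eq_true, if_false]
    rw [pvIfBool, Bool.eq_iff_iff, ite_eq_iff]
    simp only [Bool.and_eq_true, decide_eq_true_eq, Bool.false_eq_true, and_false, false_or,
      not_le]
    constructor
    · rintro ⟨h1, h2⟩
      refine ⟨?_, ?_⟩
      · omega
      · linarith
    · rintro ⟨h1, h2⟩
      exact ⟨by omega, by linarith⟩
  · have hadj : (((PySem.List.sorted row (fun x => x) false).zip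
        (PySem.List.sorted row (fun x => x) false).tail).any (fun p => p.1 == p.2)) = true := by
      cases h : (((PySem.List.sorted row (fun x => x) false).zip
        (PySem.List.sorted row (fun x => x) false).tail).any (fun p => p.1 == p.2)) with
      | false => exact absurd ((adj_any_eq_false_iff_nodup row).1 h) hnd
      | true => rfl
    have hlen : ((PySem.Set.ofList row).length == row.length) = false := by
      simp only [beq_eq_false_iff_ne, ne_eq]
      intro h
      exact hnd ((ofList_length_iff_nodup row).1 h)
    simp [hadj, hlen]
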